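-- pv_equiv track=rewrite | github.com/ahmedelmetwally74/Agentic-ATS | matching/applicant_requirement_matchers.py | _has_related_field
-- ===== SOURCE A (Python) =====
-- def _has_related_field(required_families: set[str], cv_families: set[str]) -> bool:
--     if not required_families or not cv_families:
--         return False
--
--     related_pairs = {
--         ("computer_science", "engineering"),
--         ("computer_science", "data_science"),
--         ("statistics", "mathematics"),
--         ("data_science", "statistics"),
--     }
--
--     for required_family in required_families:
--         for cv_family in cv_families:
--             if required_family == cv_family:
--                 return True
--             if (required_family, cv_family) in related_pairs or (cv_family, required_family) in related_pairs:
--                 return True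
--     return False
-- ===== SOURCE B (Python) =====
-- def _has_related_field(required_families: set[str], cv_families: set[str]) -> bool:
--     if not required_families or not cv_families:
--         return False
--
--     related_pairs = [
--         ("computer_science", "engineering"),
--         ("computer_science", "data_science"),
--         ("statistics", "mathematics"),
--         ("data_science", "statistics"),
--     ]
--
--     # Build the closure of acceptable families once, then intersect.
--     expanded = set(required_families)
--     for a, b in related_pairs:
--         if a in required_families:
--             expanded.add(b)
--         if b in required_families:
--             expanded.add(a)
--     return bool(expanded & cv_families)
-- ===== Notes on version B (the rewrite author's own statement) =====
-- stated objective: alternative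
-- what changed: B replaces A's nested scan over the product of the two sets (with early return) by building the closure of acceptable families from the 4 related pairs once and then testing a single set intersection for non-emptiness.
import Mathlib
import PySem

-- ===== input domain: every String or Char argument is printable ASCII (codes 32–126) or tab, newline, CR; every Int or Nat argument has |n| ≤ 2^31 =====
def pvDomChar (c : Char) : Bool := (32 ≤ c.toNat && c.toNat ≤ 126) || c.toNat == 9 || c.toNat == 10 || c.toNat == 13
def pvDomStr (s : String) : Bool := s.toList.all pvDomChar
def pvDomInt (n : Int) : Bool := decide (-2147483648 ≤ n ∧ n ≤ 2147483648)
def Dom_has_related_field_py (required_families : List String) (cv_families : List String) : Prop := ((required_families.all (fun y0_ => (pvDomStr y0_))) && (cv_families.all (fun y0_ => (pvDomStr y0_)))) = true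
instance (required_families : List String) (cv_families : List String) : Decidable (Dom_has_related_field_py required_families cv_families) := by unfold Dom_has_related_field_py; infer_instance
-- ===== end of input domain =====

-- B builds the closure of acceptable families once and tests one set intersection instead of
-- A's nested scan over the product of the two sets ("alternative" objective); equal return value everywhere.

-- ===== PORT A =====
-- the literal set of related pairs (a Python set of 4 distinct tuples)
def pvRelatedPairs : PySem.Set (String × String) :=
  PySem.Set.ofList
    [("computer_science", "engineering"),
     ("computer_science", "data_science"),
     ("statistics", "mathematics"),
     ("data_science", "statistics")]

-- inner 'for cv_family in cv_families' loop, with its two early returns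
def pvInnerA (required_family : String) (cv_families : List String) : Bool :=
  match cv_families with
  | [] => false
  | cv_family :: rest =>
    if required_family == cv_family then true
    else if PySem.Set.contains pvRelatedPairs (required_family, cv_family)
            || PySem.Set.contains pvRelatedPairs (cv_family, required_family) then true
    else pvInnerA required_family rest

-- outer 'for required_family in required_families' loop
def pvOuterA (required_families : List String) (cv_families : List String) : Bool :=
  match required_families with
  | [] => false
  | required_family :: rest =>
    if pvInnerA required_family cv_families then true
    else pvOuterA rest cv_families

def has_related_field_py (required_families : List String) (cv_families : List String) : Bool :=
  if required_families.isEmpty || cv_families.isEmpty then false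
  else pvOuterA required_families cv_families

-- ===== PORT B =====
-- expanded = set(required_families); for (a,b) in related_pairs: add closures
def pvExpand (required_families : List String) : PySem.Set String :=
  pvRelatedPairs.foldl
    (fun ex p =>
      let ex := if required_families.contains p.1 then PySem.Set.add ex p.2 else ex
      if required_families.contains p.2 then PySem.Set.add ex p.1 else ex)
    (PySem.Set.ofList required_families)

def has_related_field_py_alt (required_families : List String) (cv_families : List String) : Bool :=
  if required_families.isEmpty || cv_families.isEmpty then false
  else !(PySem.Set.inter (pvExpand required_families) cv_families).isEmpty

-- ===== PRECONDITION & SPEC =====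
def Spec_has_related_field_py (required_families : List String) (cv_families : List String) (out : Bool) : Prop := out = has_related_field_py_alt required_families cv_families
instance (required_families : List String) (cv_families : List String) (out : Bool) : Decidable (Spec_has_related_field_py required_families cv_families out) := by unfold Spec_has_related_field_py; infer_instance

-- ===== CLAIM (what is proved, stated in full; the proofs are below) =====
def Claim_equal_has_related_field_py : Prop := ∀ (required_families : List String) (cv_families : List String), Dom_has_related_field_py required_families cv_families → Spec_has_related_field_py required_families cv_families (has_related_field_py required_families cv_families)

-- ===== LEMMAS AND PROOFS =====

-- the per-pair predicate A tests inside its inner loop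
def pvRel (r c : String) : Bool :=
  r == c || (PySem.Set.contains pvRelatedPairs (r, c) || PySem.Set.contains pvRelatedPairs (c, r))

-- the related pairs as a plain literal list (proof-side view of pvRelatedPairs)
def pvPairsList : List (String × String) :=
  [("computer_science", "engineering"),
   ("computer_science", "data_science"),
   ("statistics", "mathematics"),
   ("data_science", "statistics")]

theorem pvRelatedPairs_eq : (pvRelatedPairs : List (String × String)) = pvPairsList := by decide

theorem pvInnerA_eq_any (r : String) (cv : List String) :
    pvInnerA r cv = cv.any (fun c => pvRel r c) := by
  induction cv with
  | nil => rfl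
  | cons c rest ih =>
    rw [pvInnerA]
    split_ifs with h1 h2
    · have : pvRel r c = true := by simp [pvRel, h1]
      simp [List.any_cons, this]
    · have : pvRel r c = true := by unfold pvRel; rw [h2]; simp
      simp [List.any_cons, this]
    · have : pvRel r c = false := by
        unfold pvRel
        simp only [Bool.not_eq_true] at h1 h2
        rw [h1, h2]; rfl
      simp [List.any_cons, this, ih]

theorem pvOuterA_eq_any (req cv : List String) :
    pvOuterA req cv = req.any (fun r => pvInnerA r cv) := by
  induction req with
  | nil => rfl
  | cons r rest ih =>
    rw [pvOuterA]
    split_ifs with h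
    · simp [List.any_cons, h]
    · simp only [Bool.not_eq_true] at h
      simp [List.any_cons, h, ih]

theorem mem_pvExpand (req : List String) (x : String) :
    x ∈ pvExpand req ↔
      x ∈ req ∨ ∃ p ∈ pvPairsList, (p.1 ∈ req ∧ x = p.2) ∨ (p.2 ∈ req ∧ x = p.1) := by
  rw [pvExpand, pvRelatedPairs_eq]
  simp only [pvPairsList, List.foldl]
  by_cases h1 : req.contains "computer_science" <;>
  by_cases h2 : req.contains "engineering" <;>
  by_cases h3 : req.contains "data_science" <;>
  by_cases h4 : req.contains "statistics" <;>
  by_cases h5 : req.contains "mathematics" <;>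
    simp_all [PySem.Set.mem_ofList] <;> aesop

theorem B_true_iff (req cv : List String) :
    (!(PySem.Set.inter (pvExpand req) cv).isEmpty) = true ↔
      ∃ c ∈ cv, c ∈ pvExpand req := by
  rw [Bool.not_eq_eq_eq_not, Bool.not_true, List.isEmpty_eq_false_iff_exists_mem]
  constructor
  · rintro ⟨x, hx⟩
    have := (PySem.Set.mem_inter _ _ _).1 hx
    exact ⟨x, this.2, this.1⟩
  · rintro ⟨c, hc, he⟩
    exact ⟨c, (PySem.Set.mem_inter _ _ _).2 ⟨he, hc⟩⟩

theorem A_true_iff (req cv : List String) :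
    pvOuterA req cv = true ↔
      ∃ r ∈ req, ∃ c ∈ cv, (r = c ∨ (r, c) ∈ pvPairsList ∨ (c, r) ∈ pvPairsList) := by
  simp only [pvOuterA_eq_any, pvInnerA_eq_any, List.any_eq_true, pvRel,
    Bool.or_eq_true, beq_iff_eq, PySem.Set.contains_iff, pvRelatedPairs_eq]

theorem has_related_field_py_agree (req cv : List String) :
    has_related_field_py req cv = has_related_field_py_alt req cv := by
  unfold has_related_field_py has_related_field_py_alt
  split_ifs with h
  · rfl
  · rw [Bool.eq_iff_iff, A_true_iff, B_true_iff]
    constructor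
    · rintro ⟨r, hr, c, hc, hrel⟩
      refine ⟨c, hc, (mem_pvExpand req c).2 ?_⟩
      rcases hrel with heq | hpair | hpair
      · exact Or.inl (heq ▸ hr)
      · exact Or.inr ⟨(r, c), hpair, Or.inl ⟨hr, rfl⟩⟩
      · exact Or.inr ⟨(c, r), hpair, Or.inr ⟨hr, rfl⟩⟩
    · rintro ⟨c, hc, he⟩
      rcases (mem_pvExpand req c).1 he with hcr | ⟨p, hp, ⟨hr, hx⟩ | ⟨hr, hx⟩⟩
      · exact ⟨c, hcr, c, hc, Or.inl rfl⟩
      · refine ⟨p.1, hr, c, hc, Or.inr (Or.inl ?_)⟩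
        subst hx; simpa using hp
      · refine ⟨p.2, hr, c, hc, Or.inr (Or.inr ?_)⟩
        subst hx; simpa using hp

-- ===== VERDICT (by name: the statement is the Claim_ definition above) =====
theorem has_related_field_py_spec : Claim_equal_has_related_field_py := by
  intro req cv _
  exact has_related_field_py_agree req cv
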